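-- pv_equiv track=rewrite | github.com/Dinesh-Kumar-Tunguturi/profile | main/views.py | _ordered_sections
-- ===== SOURCE A (Python) =====
-- def _ordered_sections(sections):
--     key_mapping = {
--         "ATS": "Resume (ATS Readiness)",
--         "GitHub": "GitHub Score",
--         "LeetCode": "LeetCode Score",
--         "LinkedIn": "LinkedIn Profile",
--         "Portfolio": "Portfolio",
--         "Certifications": "Certifications",
--     }
--
--     desired_order = ["ATS", "GitHub", "LeetCode", "LinkedIn", "Portfolio", "Certifications"]
--
--     ordered = []
--     for name in desired_order:
--         key = key_mapping.get(name)
--         if key and key in sections: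
--             ordered.append((key, sections[key]))
--
--     existing_keys = {k for k, _ in ordered}
--     for key, value in sections.items():
--         if key not in existing_keys:
--             ordered.append((key, value))
--
--     return ordered
-- ===== SOURCE B (Python) =====
-- def _ordered_sections(sections):
--     priority = ["Resume (ATS Readiness)", "GitHub Score", "LeetCode Score",
--                 "LinkedIn Profile", "Portfolio", "Certifications"]
--     rank = {k: i for i, k in enumerate(priority)}
--     return sorted(sections.items(), key=lambda kv: rank.get(kv[0], len(priority)))
-- ===== Notes on version B (the rewrite author's own statement) =====
-- stated objective: alternative
-- what changed: A builds the result by a priority-list walk with dict membership tests followed by a second rescan against a set of emitted keys; B builds a rank table mapping each priority key to its index and returns a single stable sort of sections.items() keyed by rank with sentinel 6 for non-priority keys.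
import Mathlib
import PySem

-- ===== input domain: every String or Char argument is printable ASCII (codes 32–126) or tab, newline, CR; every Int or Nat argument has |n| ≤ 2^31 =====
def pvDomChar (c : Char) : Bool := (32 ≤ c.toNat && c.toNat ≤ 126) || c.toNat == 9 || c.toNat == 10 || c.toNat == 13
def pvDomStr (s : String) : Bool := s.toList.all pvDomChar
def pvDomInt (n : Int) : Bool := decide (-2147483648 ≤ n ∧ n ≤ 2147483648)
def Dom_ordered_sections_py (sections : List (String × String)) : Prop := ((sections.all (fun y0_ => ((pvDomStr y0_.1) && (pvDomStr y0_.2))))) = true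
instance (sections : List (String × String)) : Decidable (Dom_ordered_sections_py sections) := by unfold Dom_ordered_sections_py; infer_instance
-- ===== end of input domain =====

-- B replaces A's two-pass scan by ONE stable sort of the items keyed by a rank table
-- (priority key -> index, sentinel 6 otherwise); objective: alternative (same practical cost).
-- Pre_ excludes association lists with duplicate keys, which cannot arise from a Python dict.


-- ===== PORT A =====
-- the literal dict `key_mapping` of A
def pvKeyMapping : PySem.Dict String String :=
  ⟨[("ATS", "Resume (ATS Readiness)"), ("GitHub", "GitHub Score"),
    ("LeetCode", "LeetCode Score"), ("LinkedIn", "LinkedIn Profile"),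
    ("Portfolio", "Portfolio"), ("Certifications", "Certifications")]⟩

def pvDesiredOrder : List String :=
  ["ATS", "GitHub", "LeetCode", "LinkedIn", "Portfolio", "Certifications"]

-- the dict parameter `sections` arrives as its items list (insertion order);
-- `key in sections` / `sections[key]` are Dict.contains / first-match get? on it
def ordered_sections_py (sections : List (String × String)) : List (String × String) :=
  let d : PySem.Dict String String := ⟨sections⟩
  let ordered : List (String × String) :=
    pvDesiredOrder.foldl (fun ordered name =>
      match PySem.Dict.get? pvKeyMapping name with
      | none => ordered                                   -- `key` is None: falsy
      | some key =>
        if (key != "") && d.contains key then             -- `if key and key in sections`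
          ordered ++ [(key, (d.get? key).getD "")]        -- sections[key], guarded by `key in sections`
        else ordered) []
  let existing_keys : PySem.Set String := PySem.Set.ofList (ordered.map (·.1))
  sections.foldl (fun ordered kv =>
    if PySem.Set.contains existing_keys kv.1 then ordered else ordered ++ [kv]) ordered

-- ===== PORT B =====
def pvPriority : List String :=
  ["Resume (ATS Readiness)", "GitHub Score", "LeetCode Score",
   "LinkedIn Profile", "Portfolio", "Certifications"]

-- rank = {k: i for i, k in enumerate(priority)}
def pvRank : PySem.Dict String Int :=
  (PySem.List.enumerate pvPriority).foldl (fun d ik => d.insert ik.2 ik.1) PySem.Dict.empty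

-- sorted(sections.items(), key=lambda kv: rank.get(kv[0], len(priority)))
def ordered_sections_py_alt (sections : List (String × String)) : List (String × String) :=
  PySem.List.sorted sections
    (fun kv => (pvRank.get? kv.1).getD ((pvPriority.length : Int))) false

-- ===== PRECONDITION & SPEC =====
-- Pre_ excludes association lists with duplicate keys: the Python parameter is a dict,
-- whose items() never repeats a key, so such lists represent no Python input at all.
def Pre_ordered_sections_py (sections : List (String × String)) : Prop :=
  (sections.map Prod.fst).Nodup
instance (sections : List (String × String)) : Decidable (Pre_ordered_sections_py sections) := by unfold Pre_ordered_sections_py; infer_instance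

def pvWitness_ordered_sections_py : (List (String × String)) :=
  [("GitHub Score", "82"), ("Alpha", "x"), ("Portfolio", "ok")]

def Spec_ordered_sections_py (sections : List (String × String)) (out : List (String × String)) : Prop := out = ordered_sections_py_alt sections
instance (sections : List (String × String)) (out : List (String × String)) : Decidable (Spec_ordered_sections_py sections out) := by unfold Spec_ordered_sections_py; infer_instance

-- ===== CLAIM (what is proved, stated in full; the proofs are below) =====
def Claim_equal_ordered_sections_py : Prop := ∀ (sections : List (String × String)), Dom_ordered_sections_py sections → Pre_ordered_sections_py sections → Spec_ordered_sections_py sections (ordered_sections_py sections)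

-- ===== LEMMAS AND PROOFS =====

-- rank value of a key (what B's sort key computes), in closed form
def pvRankVal (k : String) : Int := (pvRank.get? k).getD 6

set_option maxRecDepth 8000 in
theorem pvRankVal_cases (k : String) :
    pvRankVal k =
      if "Resume (ATS Readiness)" = k then 0 else if "GitHub Score" = k then 1
      else if "LeetCode Score" = k then 2 else if "LinkedIn Profile" = k then 3
      else if "Portfolio" = k then 4 else if "Certifications" = k then 5 else 6 := by
  have h : pvRank = ⟨[("Resume (ATS Readiness)", 0), ("GitHub Score", 1),
      ("LeetCode Score", 2), ("LinkedIn Profile", 3), ("Portfolio", 4),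
      ("Certifications", 5)]⟩ := by decide
  simp only [pvRankVal, h, PySem.Dict.get?_mk_cons, beq_iff_eq]
  split_ifs <;> rfl

-- ---- A's side: A = priority filterMap ++ non-priority filter ----

theorem foldA_literal (d : PySem.Dict String String) :
    pvDesiredOrder.foldl (fun ordered name =>
      match PySem.Dict.get? pvKeyMapping name with
      | none => ordered
      | some key =>
        if (key != "") && d.contains key then
          ordered ++ [(key, (d.get? key).getD "")]
        else ordered) []
    = pvPriority.foldl (fun ordered k =>
        if d.contains k then ordered ++ [(k, (d.get? k).getD "")] else ordered) [] := by
  simp [pvDesiredOrder, pvPriority, pvKeyMapping, List.foldl, PySem.Dict.get?_mk_cons]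

theorem foldA_eq_filterMap (d : PySem.Dict String String) (ks : List String)
    (acc : List (String × String)) :
    ks.foldl (fun ordered k =>
      if d.contains k then ordered ++ [(k, (d.get? k).getD "")] else ordered) acc
    = acc ++ ks.filterMap (fun k => (d.get? k).map (fun v => (k, v))) := by
  induction ks generalizing acc with
  | nil => simp
  | cons k ks ih =>
    simp only [List.foldl_cons, List.filterMap_cons]
    rw [ih, PySem.Dict.contains_eq_isSome_get?]
    cases h : d.get? k <;> simp [h]

theorem map_fst_filterMap (d : PySem.Dict String String) (ks : List String) :
    (ks.filterMap (fun k => (d.get? k).map (fun v => (k, v)))).map (·.1)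
    = ks.filter (fun k => (d.get? k).isSome) := by
  induction ks with
  | nil => rfl
  | cons k ks ih => cases h : d.get? k <;> simp [h, ih]

theorem foldA2_eq_filter (p : String × String → Bool) (l acc : List (String × String)) :
    l.foldl (fun ordered kv => if p kv then ordered else ordered ++ [kv]) acc
    = acc ++ l.filter (fun kv => !p kv) := by
  induction l generalizing acc with
  | nil => simp
  | cons kv l ih =>
    simp only [List.foldl_cons, List.filter_cons]
    cases h : p kv <;> simp [h, ih]

theorem get?_isSome_of_mem (sections : List (String × String)) (kv : String × String)
    (h : kv ∈ sections) : ((PySem.Dict.mk sections).get? kv.1).isSome = true := by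
  rw [Option.isSome_iff_ne_none, Ne, PySem.Dict.get?_eq_none_iff_not_mem_keys]
  simp only [PySem.Dict.keys_mk, not_not]
  exact List.mem_map_of_mem h

theorem A_shape (sections : List (String × String)) :
    ordered_sections_py sections
    = pvPriority.filterMap
        (fun k => ((PySem.Dict.mk sections).get? k).map (fun v => (k, v)))
      ++ sections.filter (fun kv => !(pvPriority.contains kv.1)) := by
  unfold ordered_sections_py
  simp only []
  rw [foldA_literal, foldA_eq_filterMap, List.nil_append, foldA2_eq_filter]
  congr 1
  apply List.filter_congr
  intro kv hkv
  have hin := get?_isSome_of_mem sections kv hkv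
  congr 1
  rw [← Bool.coe_iff_coe]
  simp only [PySem.Set.contains_iff, PySem.Set.mem_ofList, map_fst_filterMap,
    List.mem_filter, List.contains_iff_mem]
  constructor
  · rintro ⟨h, _⟩; exact h
  · intro h; exact ⟨h, hin⟩

-- ---- B's side: a stable sort by an Int-valued key with finitely many values
-- ---- is the concatenation of the key-level filters, in ascending key order ----

theorem insert_pass {α : Type} (before : α → α → Bool) (x : α) (A B : List α)
    (h : ∀ a ∈ A, before x a = false) :
    PySem.List.insertBy before x (A ++ B) = A ++ PySem.List.insertBy before x B := by
  induction A with
  | nil => rfl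
  | cons a A ih =>
    have ha : before x a = false := h a (List.mem_cons_self)
    simp only [List.cons_append, PySem.List.insertBy, ha, Bool.false_eq_true, if_false]
    rw [ih (fun a ha' => h a (List.mem_cons_of_mem _ ha'))]

theorem insert_front {α : Type} (before : α → α → Bool) (x : α) (B : List α)
    (h : ∀ b ∈ B, before x b = true) :
    PySem.List.insertBy before x B = x :: B := by
  cases B with
  | nil => rfl
  | cons b B => simp [PySem.List.insertBy, h b (List.mem_cons_self)]

theorem insert_flat {α : Type} (key : α → Int) (x : α) (rs : List Int)
    (hrs : rs.Pairwise (· < ·)) (hx : key x ∈ rs) (xs : List α) :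
    PySem.List.insertBy (fun a b => decide (key a < key b)) x
      (rs.flatMap (fun r => xs.filter (fun y => key y == r)))
    = rs.flatMap (fun r => (xs ++ [x]).filter (fun y => key y == r)) := by
  induction rs with
  | nil => cases hx
  | cons r rs ih =>
    have hlt : ∀ r' ∈ rs, r < r' := (List.pairwise_cons.mp hrs).1
    have hpass : ∀ a ∈ xs.filter (fun y => key y == r),
        (decide (key x < key a)) = false := by
      intro a ha
      have : key a = r := by simpa using (List.mem_filter.mp ha).2
      by_cases hkx : key x = r
      · simp [this, hkx]
      · have hxr : key x ∈ rs := by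
          rcases List.mem_cons.mp hx with h | h
          · exact absurd h hkx
          · exact h
        have : r < key x := hlt _ hxr
        simp only [decide_eq_false_iff_not, not_lt, ‹key a = r›]
        omega
    simp only [List.flatMap_cons]
    rw [insert_pass _ _ _ _ hpass]
    by_cases hkx : key x = r
    · have hfront : ∀ b ∈ rs.flatMap (fun r => xs.filter (fun y => key y == r)),
          (decide (key x < key b)) = true := by
        intro b hb
        rcases List.mem_flatMap.mp hb with ⟨r', hr', hbf⟩
        have : key b = r' := by simpa using (List.mem_filter.mp hbf).2
        have := hlt _ hr'
        simp only [decide_eq_true_eq, ‹key b = r'›, hkx]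
        omega
      rw [insert_front _ _ _ hfront]
      have htail : ∀ r' ∈ rs,
          (xs ++ [x]).filter (fun y => key y == r')
          = xs.filter (fun y => key y == r') := by
        intro r' hr'
        have := hlt _ hr'
        simp only [List.filter_append, List.filter_cons, List.filter_nil]
        have : (key x == r') = false := by
          simp only [beq_eq_false_iff_ne, hkx]; omega
        simp [this]
      rw [List.flatMap_congr (fun r' hr' => htail r' hr')]
      simp [List.filter_append, hkx]
    · have hxr : key x ∈ rs := by
        rcases List.mem_cons.mp hx with h | h
        · exact absurd h hkx
        · exact h
      rw [ih (List.pairwise_cons.mp hrs).2 hxr]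
      have : (key x == r) = false := beq_eq_false_iff_ne.mpr hkx
      simp [List.filter_append, List.filter_cons, this]

theorem sorted_flat {α : Type} (key : α → Int) (rs : List Int)
    (hrs : rs.Pairwise (· < ·)) (xs : List α) (hcov : ∀ x ∈ xs, key x ∈ rs) :
    PySem.List.sorted xs key false
    = rs.flatMap (fun r => xs.filter (fun x => key x == r)) := by
  induction xs using List.reverseRecOn with
  | nil =>
    rw [PySem.List.sorted_eq_foldl_insertBy]
    simp
  | append_singleton xs x ih =>
    rw [PySem.List.sorted_eq_foldl_insertBy, List.foldl_append, List.foldl_cons,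
      List.foldl_nil, ← PySem.List.sorted_eq_foldl_insertBy,
      ih (fun y hy => hcov y (List.mem_append_left _ hy)),
      insert_flat key x rs hrs (hcov x (by simp)) xs]

-- ---- bridging the two shapes under Nodup keys ----

theorem filter_key_eq_get (p : String) (sections : List (String × String))
    (hnd : (sections.map Prod.fst).Nodup) :
    sections.filter (fun kv => kv.1 == p)
    = (((PySem.Dict.mk sections).get? p).map (fun v => (p, v))).toList := by
  induction sections with
  | nil => rfl
  | cons kv t ih =>
    obtain ⟨k, v⟩ := kv
    have hnd2 : k ∉ t.map Prod.fst ∧ (t.map Prod.fst).Nodup := by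
      simpa [List.nodup_cons] using hnd
    by_cases hk : k = p
    · subst hk
      have hnone : t.filter (fun kv => kv.1 == k) = [] := by
        apply List.filter_eq_nil_iff.mpr
        intro kv hkv
        simp only [beq_iff_eq]
        intro e
        exact hnd2.1 (e ▸ List.mem_map_of_mem hkv)
      simp [PySem.Dict.get?_mk_cons, hnone]
    · have hb : (k == p) = false := beq_eq_false_iff_ne.mpr hk
      simp only [List.filter_cons, hb, Bool.false_eq_true, if_false,
        PySem.Dict.get?_mk_cons]
      rw [ih hnd2.2]

theorem rankVal_mem (k : String) :
    pvRankVal k ∈ ([0, 1, 2, 3, 4, 5, 6] : List Int) := by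
  rw [pvRankVal_cases]; split_ifs <;> simp

theorem B_shape (sections : List (String × String)) :
    ordered_sections_py_alt sections
    = ([0, 1, 2, 3, 4, 5, 6] : List Int).flatMap
        (fun r => sections.filter (fun kv => pvRankVal kv.1 == r)) := by
  unfold ordered_sections_py_alt
  have hk : (fun kv : String × String =>
      (pvRank.get? kv.1).getD ((pvPriority.length : Int))) = fun kv => pvRankVal kv.1 := by
    funext kv; simp [pvRankVal, pvPriority]
  rw [hk]
  exact sorted_flat _ _ (by decide) sections (fun x _ => rankVal_mem x.1)

theorem rank_filter_eq (i : Int) (p : String)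
    (hip : ∀ k : String, pvRankVal k = i ↔ k = p) (sections : List (String × String)) :
    sections.filter (fun kv => pvRankVal kv.1 == i)
    = sections.filter (fun kv => kv.1 == p) := by
  apply List.filter_congr
  intro kv _
  rw [← Bool.coe_iff_coe]
  simp [hip kv.1]

theorem ordered_sections_py_eq (sections : List (String × String))
    (hnd : (sections.map Prod.fst).Nodup) :
    ordered_sections_py sections = ordered_sections_py_alt sections := by
  rw [A_shape, B_shape]
  have hseg : ∀ (i : Int) (p : String), (∀ k : String, pvRankVal k = i ↔ k = p) →
      sections.filter (fun kv => pvRankVal kv.1 == i)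
      = (((PySem.Dict.mk sections).get? p).map (fun v => (p, v))).toList := by
    intro i p hip
    rw [rank_filter_eq i p hip, filter_key_eq_get p sections hnd]
  have h0 := hseg 0 "Resume (ATS Readiness)"
    (fun k => by rw [pvRankVal_cases]; split_ifs <;> subst_vars <;> simp_all [eq_comm])
  have h1 := hseg 1 "GitHub Score"
    (fun k => by rw [pvRankVal_cases]; split_ifs <;> subst_vars <;> simp_all [eq_comm])
  have h2 := hseg 2 "LeetCode Score"
    (fun k => by rw [pvRankVal_cases]; split_ifs <;> subst_vars <;> simp_all [eq_comm])
  have h3 := hseg 3 "LinkedIn Profile"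
    (fun k => by rw [pvRankVal_cases]; split_ifs <;> subst_vars <;> simp_all [eq_comm])
  have h4 := hseg 4 "Portfolio"
    (fun k => by rw [pvRankVal_cases]; split_ifs <;> subst_vars <;> simp_all [eq_comm])
  have h5 := hseg 5 "Certifications"
    (fun k => by rw [pvRankVal_cases]; split_ifs <;> subst_vars <;> simp_all [eq_comm])
  have h6 : sections.filter (fun kv => pvRankVal kv.1 == (6 : Int))
      = sections.filter (fun kv => !(pvPriority.contains kv.1)) := by
    apply List.filter_congr
    intro kv _
    rw [← Bool.coe_iff_coe]
    have : pvRankVal kv.1 = 6 ↔ kv.1 ∉ pvPriority := by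
      rw [pvRankVal_cases]
      simp only [pvPriority, List.mem_cons, List.not_mem_nil, or_false]
      split_ifs <;> simp_all [eq_comm]
    simp [this]
  simp only [List.flatMap_cons, List.flatMap_nil, List.append_nil,
    h0, h1, h2, h3, h4, h5, h6, pvPriority, List.filterMap_cons, List.filterMap_nil]
  cases ((PySem.Dict.mk sections).get? "Resume (ATS Readiness)") <;>
  cases ((PySem.Dict.mk sections).get? "GitHub Score") <;>
  cases ((PySem.Dict.mk sections).get? "LeetCode Score") <;>
  cases ((PySem.Dict.mk sections).get? "LinkedIn Profile") <;>
  cases ((PySem.Dict.mk sections).get? "Portfolio") <;>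
  cases ((PySem.Dict.mk sections).get? "Certifications") <;> simp

-- ===== VERDICT (by name: the statement is the Claim_ definition above) =====
theorem ordered_sections_py_spec : Claim_equal_ordered_sections_py := by
  intro sections _ hpre
  unfold Spec_ordered_sections_py
  exact ordered_sections_py_eq sections hpre
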